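-- pv_equiv track=rewrite | github.com/hmbui/rogue2yaml | rogue2yaml.py | _generate_class_name_variations
-- ===== SOURCE A (Python) =====
-- def _generate_class_name_variations(class_name):
--     """
--     Attempt to guess the class name by varying the capitalization of character combos in the class name string.
--
--     Parameters
--     ----------
--     class_name : str
--         The name of a Python Rogue class
--
--     Yields : str
--     -------
--         The next name with the next capitalization variation
--     """
--     if class_name is not None:
--         class_name_length = len(class_name)
--         for value in range(0, 2 ** class_name_length):
--             bit_pattern = [value >> i & 1 for i in range(class_name_length - 1, -1, -1)]
--             set_bit_indices = []
--             for i in range(0, len(bit_pattern)):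
--                 if bit_pattern[i]:
--                     set_bit_indices.append(i)
--             processed_name = class_name
--             for set_bit_index in set_bit_indices:
--                 processed_name = ''.join([processed_name[:set_bit_index], processed_name[set_bit_index].upper(),
--                                           processed_name[set_bit_index + 1:]])
--             yield processed_name
-- ===== SOURCE B (Python) =====
-- def _generate_class_name_variations(class_name):
--     """Yield every capitalization variation of class_name.
--
--     Characters (and their precomputed uppercase forms) are picked directly
--     from the bit pattern of the counter in a single pass, instead of
--     rebuilding the string by slicing once per set bit.
--     """
--     if class_name is None:
--         return
--     chars = list(class_name)
--     uppers = [c.upper() for c in chars]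
--     n = len(chars)
--     for value in range(2 ** n):
--         yield ''.join(uppers[i] if (value >> (n - 1 - i)) & 1 else chars[i]
--                       for i in range(n))
-- ===== Notes on version B (the rewrite author's own statement) =====
-- stated objective: alternative
-- what changed: Instead of computing a bit-pattern list, collecting set-bit indices and rebuilding the string by three-way slicing once per set bit, B precomputes the uppercase form of each character once and emits each variation in a single pass that picks chars[i] or uppers[i] straight from the counter's bits.
import Mathlib
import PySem

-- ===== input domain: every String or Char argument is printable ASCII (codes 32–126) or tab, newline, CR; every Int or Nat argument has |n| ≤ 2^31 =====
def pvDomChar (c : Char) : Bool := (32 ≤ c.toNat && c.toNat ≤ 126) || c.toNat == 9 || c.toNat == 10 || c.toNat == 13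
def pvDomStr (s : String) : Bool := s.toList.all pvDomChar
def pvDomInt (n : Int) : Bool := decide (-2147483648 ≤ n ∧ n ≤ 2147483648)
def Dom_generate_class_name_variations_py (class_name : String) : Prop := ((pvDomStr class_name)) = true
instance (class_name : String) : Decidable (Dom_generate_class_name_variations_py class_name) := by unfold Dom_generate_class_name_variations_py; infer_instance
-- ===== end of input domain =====

-- B replaces A's per-set-bit slice-and-rebuild with one pass over precomputed uppercase chars per variation (objective: alternative).
-- The Python A is a generator; both ports return the list of all yielded strings.

-- ===== PORT A =====
-- one variation, A's way: bit_pattern list, set_bit_indices list, then re-slice the name once per set bit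
-- (indices taken from range(len) are always in range, so pyGetD's default is never used)
def pvAOne (cs : List Char) (n : Nat) (value : Int) : List Char :=
  -- bit_pattern = [value >> i & 1 for i in range(n-1, -1, -1)]
  let bit_pattern : List Int :=
    (PySem.List.pyRange ((n : Int) - 1) (-1) (-1)).map (fun i => PySem.Int.band (value >>> i.toNat) 1)
  -- set_bit_indices accumulated by the for/if/append loop
  let set_bit_indices : List Int :=
    (PySem.List.pyRange 0 (bit_pattern.length : Int) 1).foldl
      (fun acc i => if PySem.List.pyGetD bit_pattern i 0 ≠ 0 then acc ++ [i] else acc) []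
  -- processed_name = ''.join([processed_name[:i], processed_name[i].upper(), processed_name[i+1:]])
  set_bit_indices.foldl
    (fun s i =>
      PySem.List.slice s none (some i)
        ++ PySem.Chars.upper [PySem.List.pyGetD s i ' ']
        ++ PySem.List.slice s (some (i + 1)) none)
    cs

def generate_class_name_variations_py (class_name : String) : List String :=
  let cs := class_name.toList
  let n := cs.length
  (PySem.List.pyRange 0 ((2 ^ n : Nat) : Int) 1).map
    (fun value => String.ofList (pvAOne cs n value))

-- ===== PORT B =====
-- one variation, B's way: pick chars[i] or uppers[i] straight from the counter's bits, one pass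
def pvBOne (cs : List Char) (uppers : List (List Char)) (n : Nat) (value : Int) : List Char :=
  ((List.range n).map
    (fun i => if PySem.Int.band (value >>> (n - 1 - i)) 1 ≠ 0 then uppers.getD i [] else [cs.getD i ' '])).flatten

def generate_class_name_variations_py_alt (class_name : String) : List String :=
  let cs := class_name.toList
  let uppers := cs.map (fun c => PySem.Chars.upper [c])
  let n := cs.length
  (PySem.List.pyRange 0 ((2 ^ n : Nat) : Int) 1).map
    (fun value => String.ofList (pvBOne cs uppers n value))

-- ===== PRECONDITION & SPEC =====
def Spec_generate_class_name_variations_py (class_name : String) (out : List String) : Prop := out = generate_class_name_variations_py_alt class_name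
instance (class_name : String) (out : List String) : Decidable (Spec_generate_class_name_variations_py class_name out) := by unfold Spec_generate_class_name_variations_py; infer_instance

-- ===== CLAIM (what is proved, stated in full; the proofs are below) =====
def Claim_equal_generate_class_name_variations_py : Prop := ∀ (class_name : String), Dom_generate_class_name_variations_py class_name → Spec_generate_class_name_variations_py class_name (generate_class_name_variations_py class_name)

-- ===== LEMMAS AND PROOFS =====

-- A's slice/upper/slice rebuild at an in-range index is a single List.set
lemma pvAStep_eq_set (s : List Char) (i : Int) (h0 : 0 ≤ i) (h1 : i < (s.length : Int)) :
    PySem.List.slice s none (some i)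
        ++ PySem.Chars.upper [PySem.List.pyGetD s i ' ']
        ++ PySem.List.slice s (some (i + 1)) none
      = s.set i.toNat (PySem.Chars.upperChar (s.getD i.toNat ' ')) := by
  have hlt : i.toNat < s.length := by omega
  rw [PySem.List.slice_to s h0, PySem.List.slice_from s (by omega : (0:Int) ≤ i + 1),
      PySem.List.pyGetD_eq_getElem s ' ' h0 h1,
      List.set_eq_take_cons_drop _ hlt]
  have : (i + 1).toNat = i.toNat + 1 := by omega
  simp [PySem.Chars.upper, this, List.getElem?_eq_getElem hlt]

-- the fold of set steps preserves the length
lemma pvFold_length (L : List Int) (s : List Char) :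
    (L.foldl (fun t i => t.set i.toNat (PySem.Chars.upperChar (t.getD i.toNat ' '))) s).length = s.length := by
  induction L generalizing s with
  | nil => rfl
  | cons i T ih => rw [List.foldl_cons, ih, List.length_set]

-- elementwise characterisation of A's fold over a nodup list of in-range indices
lemma pvFold_getElem (L : List Int) (s : List Char)
    (hL : ∀ i ∈ L, 0 ≤ i ∧ i < (s.length : Int)) (hnd : L.Nodup) (j : Nat) (hj : j < s.length) :
    (L.foldl (fun t i => t.set i.toNat (PySem.Chars.upperChar (t.getD i.toNat ' '))) s).getD j ' '
      = (if (j : Int) ∈ L then PySem.Chars.upperChar (s.getD j ' ') else s.getD j ' ') := by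
  induction L generalizing s with
  | nil => simp
  | cons i L ih =>
    obtain ⟨h0, h1⟩ := hL i (by simp)
    have hnd' : L.Nodup := hnd.of_cons
    have hiL : i ∉ L := by simpa using (List.nodup_cons.mp hnd).1
    set s' := s.set i.toNat (PySem.Chars.upperChar (s.getD i.toNat ' ')) with hs'
    have hlen' : s'.length = s.length := by simp [hs']
    have hL' : ∀ k ∈ L, 0 ≤ k ∧ k < (s'.length : Int) := by
      intro k hk; rw [hlen']; exact hL k (by simp [hk])
    have ihget := ih s' hL' hnd' (hlen' ▸ hj)
    simp only [List.foldl_cons]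
    rw [ihget]
    by_cases hjL : (j : Int) ∈ L
    · have hji : (j : Int) ≠ i := fun h => hiL (h ▸ hjL)
      have hgd : s'.getD j ' ' = s.getD j ' ' := by
        simp [hs', List.getD_eq_getElem?_getD, List.getElem?_set_ne (by omega : i.toNat ≠ j)]
      rw [if_pos hjL, if_pos (List.mem_cons_of_mem i hjL), hgd]
    · by_cases hji : (j : Int) = i
      · have hij : i.toNat = j := by omega
        have hgd : s'.getD j ' ' = PySem.Chars.upperChar (s.getD j ' ') := by
          simp [hs', hij, List.getD_eq_getElem?_getD, List.getElem?_set_self (by omega : j < s.length)]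
        rw [if_neg hjL, if_pos (by simp [hji]), hgd]
      · have hgd : s'.getD j ' ' = s.getD j ' ' := by
          simp [hs', List.getD_eq_getElem?_getD, List.getElem?_set_ne (by omega : i.toNat ≠ j)]
        rw [if_neg hjL, if_neg (by simp [hji, hjL]), hgd]

-- A's bit_pattern, read at natural index j < n, is the (n-1-j)-th bit test
lemma pvBitPattern_getD (value : Int) (n j : Nat) (hj : j < n) :
    PySem.List.pyGetD
      ((PySem.List.pyRange ((n : Int) - 1) (-1) (-1)).map (fun i => PySem.Int.band (value >>> i.toNat) 1))
      (j : Int) 0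
      = PySem.Int.band (value >>> (n - 1 - j)) 1 := by
  rw [PySem.List.pyRange_neg_one, PySem.List.pyGetD_natCast]
  have hn : ((n : Int) - 1 - -1).toNat = n := by omega
  rw [hn, List.map_map, List.getD_eq_getElem _ _ (by simpa using hj)]
  simp only [List.getElem_map, List.getElem_range, Function.comp]
  have harg : ((n : Int) - 1 - (j : Int)).toNat = n - 1 - j := by omega
  rw [harg, Int.shiftRight_natCast_right]

-- flatten of per-index singletons is a plain map (B's join of one-char pieces)
lemma pvFlatten_singletons {α β : Type} (f : α → β) (l : List α) :
    (l.map (fun x => [f x])).flatten = l.map f := by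
  induction l with
  | nil => rfl
  | cons x t ih => simp [ih]

-- A's fold of slice/upper/slice steps is a fold of List.set steps (set preserves length,
-- so every index of L stays in range at every step)
lemma pvFold_steps (L : List Int) (cs : List Char) (hLrange : ∀ i ∈ L, 0 ≤ i ∧ i < (cs.length : Int)) :
    L.foldl (fun s i =>
        PySem.List.slice s none (some i)
          ++ PySem.Chars.upper [PySem.List.pyGetD s i ' ']
          ++ PySem.List.slice s (some (i + 1)) none) cs
      = L.foldl (fun t i => t.set i.toNat (PySem.Chars.upperChar (t.getD i.toNat ' '))) cs := by
  induction L generalizing cs with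
  | nil => rfl
  | cons i T ih =>
    have hi := hLrange i (by simp)
    simp only [List.foldl_cons, pvAStep_eq_set cs i hi.1 hi.2]
    exact ih _ (fun k hk => by
      simpa [List.length_set] using hLrange k (List.mem_cons_of_mem i hk))

-- the two single-variation computations agree
lemma pvOne_eq (cs : List Char) (value : Int) :
    pvAOne cs cs.length value
      = pvBOne cs (cs.map (fun c => PySem.Chars.upper [c])) cs.length value := by
  set n := cs.length with hn
  unfold pvAOne pvBOne
  simp only []
  set bp : List Int :=
    (PySem.List.pyRange ((n : Int) - 1) (-1) (-1)).map (fun i => PySem.Int.band (value >>> i.toNat) 1) with hbp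
  have hbplen : bp.length = n := by
    simp [hbp, PySem.List.length_pyRange_neg_one]
  -- the set_bit_indices loop is a filter of range(n)
  have hsb :
      (PySem.List.pyRange 0 (bp.length : Int) 1).foldl
        (fun acc i => if PySem.List.pyGetD bp i 0 ≠ 0 then acc ++ [i] else acc) []
      = (PySem.List.pyRange 0 (bp.length : Int) 1).filter (fun i => decide (PySem.List.pyGetD bp i 0 ≠ 0)) := by
    have h : (fun (acc : List Int) i => if PySem.List.pyGetD bp i 0 ≠ 0 then acc ++ [i] else acc)
        = (fun acc i => if decide (PySem.List.pyGetD bp i 0 ≠ 0) = true then acc ++ [id i] else acc) := by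
      funext acc i; simp
    rw [h, PySem.List.foldl_append_if (fun i => decide (PySem.List.pyGetD bp i 0 ≠ 0)) id]
    simp
  rw [hsb]
  set L : List Int := (PySem.List.pyRange 0 (bp.length : Int) 1).filter
      (fun i => decide (PySem.List.pyGetD bp i 0 ≠ 0)) with hL
  have hmemL : ∀ i : Int, i ∈ L ↔ (0 ≤ i ∧ i < (n : Int)) ∧ PySem.List.pyGetD bp i 0 ≠ 0 := by
    intro i
    simp [hL, List.mem_filter, PySem.List.mem_pyRange_one, hbplen]
  have hLrange : ∀ i ∈ L, 0 ≤ i ∧ i < (cs.length : Int) := fun i hi => (hn ▸ ((hmemL i).mp hi).1)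
  have hLnd : L.Nodup := List.Nodup.filter _ (PySem.List.nodup_pyRange_one 0 _)
  -- rewrite A's fold steps to List.set (indices in L are in range at every step: length is preserved)
  have hfold := pvFold_steps L cs hLrange
  rw [hfold]
  -- B's flattened singletons are a plain map
  have hb :
      ((List.range n).map (fun i =>
          if PySem.Int.band (value >>> (n - 1 - i)) 1 ≠ 0
          then (cs.map (fun c => PySem.Chars.upper [c])).getD i []
          else [cs.getD i ' '])).flatten
        = (List.range n).map (fun i =>
            if PySem.Int.band (value >>> (n - 1 - i)) 1 ≠ 0
            then PySem.Chars.upperChar (cs.getD i ' ') else cs.getD i ' ') := by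
    rw [List.map_congr_left (g := fun i =>
        [if PySem.Int.band (value >>> (n - 1 - i)) 1 ≠ 0
         then PySem.Chars.upperChar (cs.getD i ' ') else cs.getD i ' ']) ?_]
    · exact pvFlatten_singletons _ _
    · intro i hi
      have hi' : i < n := List.mem_range.mp hi
      have : (cs.map (fun c => PySem.Chars.upper [c])).getD i []
          = [PySem.Chars.upperChar (cs.getD i ' ')] := by
        rw [List.getD_eq_getElem _ _ (by simpa [hn] using hi'),
            List.getD_eq_getElem _ _ (by omega : i < cs.length)]
        simp [PySem.Chars.upper]
      rw [this]
      exact (apply_ite (fun x => [x]) _ _ _).symm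
  rw [hb]
  -- elementwise comparison via getD
  apply List.ext_getElem
  · rw [pvFold_length]
    simp [hn]
  · intro j hj1 hj2
    have hjn : j < n := by simpa using hj2
    have hjcs : j < cs.length := by omega
    have hget := pvFold_getElem L cs hLrange hLnd j hjcs
    rw [List.getD_eq_getElem _ ' ' hj1, List.getD_eq_getElem _ ' ' hjcs] at hget
    rw [hget, List.getElem_map, List.getElem_range]
    have hmem : ((j:Int) ∈ L) ↔ PySem.Int.band (value >>> (n - 1 - j)) 1 ≠ 0 := by
      rw [hmemL, hbp, pvBitPattern_getD value n j hjn]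
      constructor
      · exact fun h => h.2
      · exact fun h => ⟨⟨by omega, by exact_mod_cast hjn⟩, h⟩
    rw [List.getD_eq_getElem _ ' ' hjcs]
    by_cases hc : PySem.Int.band (value >>> (n - 1 - j)) 1 ≠ 0
    · rw [if_pos (hmem.mpr hc), if_pos hc]
    · rw [if_neg (fun h => hc (hmem.mp h)), if_neg hc]

-- ===== VERDICT (by name: the statement is the Claim_ definition above) =====
theorem generate_class_name_variations_py_spec : Claim_equal_generate_class_name_variations_py := by
  intro s _
  unfold Spec_generate_class_name_variations_py generate_class_name_variations_py generate_class_name_variations_py_alt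
  simp only []
  exact List.map_congr_left (fun v _ => by rw [pvOne_eq])
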